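-- pv_equiv track=rewrite | github.com/blakelawyer/genrejinn | epub_parser.py | _create_pages
-- ===== SOURCE A (Python) =====
-- def _create_pages(paragraphs: list, total_pages: int = 776) -> list:
--     """Group paragraphs into pages."""
--     if not paragraphs:
--         return []
--
--     pages = []
--     total_paragraphs = len(paragraphs)
--     paragraphs_per_page = total_paragraphs // total_pages
--     extra_paragraphs = total_paragraphs % total_pages
--
--     start_index = 0
--     for page_num in range(total_pages):
--         # Some pages get one extra paragraph to distribute the remainder
--         page_size = paragraphs_per_page + (1 if page_num < extra_paragraphs else 0)
--
--         if start_index >= total_paragraphs: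
--             # If we run out of paragraphs, create empty pages
--             pages.append("")
--         else:
--             end_index = min(start_index + page_size, total_paragraphs)
--             page_paragraphs = paragraphs[start_index:end_index]
--             pages.append('\n\n'.join(page_paragraphs))
--             start_index = end_index
--
--     return pages
-- ===== SOURCE B (Python) =====
-- def _create_pages(paragraphs: list, total_pages: int = 776) -> list:
--     """Group paragraphs into pages."""
--     if not paragraphs:
--         return []
--     q, r = divmod(len(paragraphs), total_pages)
--     # Closed-form page boundary: page i starts at q*i + min(i, r).
--     def bound(i):
--         return q * i + min(i, r)
--     return ['\n\n'.join(paragraphs[bound(i):bound(i + 1)])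
--             for i in range(total_pages)]
-- ===== Notes on version B (the rewrite author's own statement) =====
-- stated objective: simpler
-- what changed: Replaces the stateful loop (mutable start_index, run-out branch, min-clamped end index) with a closed-form page-boundary formula bound(i) = q*i + min(i, r) and a single list comprehension slicing between consecutive boundaries.
import Mathlib
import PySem

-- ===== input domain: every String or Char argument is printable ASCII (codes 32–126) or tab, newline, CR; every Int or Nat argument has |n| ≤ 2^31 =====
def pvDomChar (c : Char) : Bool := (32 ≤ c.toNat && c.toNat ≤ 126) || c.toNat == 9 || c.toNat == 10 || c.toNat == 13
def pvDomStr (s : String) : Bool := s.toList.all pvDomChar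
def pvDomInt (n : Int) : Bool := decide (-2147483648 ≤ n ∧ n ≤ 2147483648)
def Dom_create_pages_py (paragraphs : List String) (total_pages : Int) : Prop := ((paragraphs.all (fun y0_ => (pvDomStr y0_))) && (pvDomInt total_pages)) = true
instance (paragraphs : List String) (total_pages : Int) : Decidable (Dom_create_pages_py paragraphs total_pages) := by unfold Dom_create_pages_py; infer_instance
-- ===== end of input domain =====

-- B differs from A only in structure: A keeps a mutable start index and a run-out branch;
-- B computes the page boundaries in closed form and slices between consecutive boundaries.

-- ===== PORT A =====
def create_pages_py (paragraphs : List String) (total_pages : Int) : List String :=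
  if paragraphs = [] then []
  else
    let total_paragraphs : Int := paragraphs.length
    let paragraphs_per_page := PySem.Int.floordiv total_paragraphs total_pages
    let extra_paragraphs := PySem.Int.mod total_paragraphs total_pages
    let res := (PySem.List.pyRange 0 total_pages 1).foldl
      (fun (st : List String × Int) page_num =>
        let pages := st.1
        let start_index := st.2
        let page_size := paragraphs_per_page + (if page_num < extra_paragraphs then 1 else 0)
        if start_index ≥ total_paragraphs then
          (pages ++ [""], start_index)
        else
          let end_index := min (start_index + page_size) total_paragraphs
          let page_paragraphs := PySem.List.slice paragraphs (some start_index) (some end_index)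
          (pages ++ [PySem.Str.join "\n\n" page_paragraphs], end_index))
      ([], 0)
    res.1

-- ===== PORT B =====
def create_pages_py_alt (paragraphs : List String) (total_pages : Int) : List String :=
  if paragraphs = [] then []
  else
    let q := PySem.Int.floordiv (paragraphs.length : Int) total_pages
    let r := PySem.Int.mod (paragraphs.length : Int) total_pages
    let bound := fun (i : Int) => q * i + min i r
    (PySem.List.pyRange 0 total_pages 1).map
      (fun i => PySem.Str.join "\n\n" (PySem.List.slice paragraphs (some (bound i)) (some (bound (i + 1)))))

-- ===== PRECONDITION & SPEC =====
-- Pre_ excludes only total_pages = 0 with a nonempty list, where both A and B raise ZeroDivisionError.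
def Pre_create_pages_py (paragraphs : List String) (total_pages : Int) : Prop :=
  paragraphs = [] ∨ total_pages ≠ 0
instance (paragraphs : List String) (total_pages : Int) : Decidable (Pre_create_pages_py paragraphs total_pages) := by unfold Pre_create_pages_py; infer_instance
def pvWitness_create_pages_py : List String × Int := (["a", "b", "c"], 2)

def Spec_create_pages_py (paragraphs : List String) (total_pages : Int) (out : List String) : Prop := out = create_pages_py_alt paragraphs total_pages
instance (paragraphs : List String) (total_pages : Int) (out : List String) : Decidable (Spec_create_pages_py paragraphs total_pages out) := by unfold Spec_create_pages_py; infer_instance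

-- ===== CLAIM (what is proved, stated in full; the proofs are below) =====
def Claim_equal_create_pages_py : Prop := ∀ (paragraphs : List String) (total_pages : Int), Dom_create_pages_py paragraphs total_pages → Pre_create_pages_py paragraphs total_pages → Spec_create_pages_py paragraphs total_pages (create_pages_py paragraphs total_pages)


-- ===== LEMMAS AND PROOFS =====

theorem pv_slice_self {xs : List String} (x : Int) : PySem.List.slice xs (some x) (some x) = [] := by
  have h : (PySem.List.slice xs (some x) (some x)).length = 0 := by
    rw [PySem.List.length_slice]; omega
  exact List.length_eq_zero_iff.mp h

-- invariant of A's loop: after the pages 0..a-1, start_index is the closed-form boundary q*a + min a r,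
-- and the accumulated pages are B's pages for 0..a-1
theorem pv_loop (paragraphs : List String) (tp q r : Int)
    (hq0 : 0 ≤ q) (hrlt : r < tp)
    (hqr : q * tp + r = (paragraphs.length : Int)) :
    ∀ (k : Nat) (a s : Int) (P : List String), (tp - a).toNat = k → 0 ≤ a →
      s = q * a + min a r →
      (((PySem.List.pyRange a tp 1).foldl
          (fun (st : List String × Int) page_num =>
            if st.2 ≥ (paragraphs.length : Int) then (st.1 ++ [""], st.2)
            else
              (st.1 ++ [PySem.Str.join "\n\n" (PySem.List.slice paragraphs (some st.2)
                  (some (min (st.2 + (q + if page_num < r then 1 else 0)) (paragraphs.length : Int))))],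
               min (st.2 + (q + if page_num < r then 1 else 0)) (paragraphs.length : Int)))
          (P, s)).1)
        = P ++ (PySem.List.pyRange a tp 1).map
            (fun i => PySem.Str.join "\n\n" (PySem.List.slice paragraphs
              (some (q * i + min i r)) (some (q * (i + 1) + min (i + 1) r)))) := by
  intro k
  induction k with
  | zero =>
    intro a s P hk _ _
    rw [PySem.List.pyRange_one_eq_nil (by omega)]
    simp
  | succ k ih =>
    intro a s P hk ha hs
    have hlt : a < tp := by omega
    have hub : ∀ b : Int, 0 ≤ b → b ≤ tp → q * b + min b r ≤ (paragraphs.length : Int) := by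
      intro b hb0 hbtp
      have h1 : q * b ≤ q * tp := Int.mul_le_mul_of_nonneg_left hbtp hq0
      have h2 : min b r ≤ r := min_le_right _ _
      linarith
    have hmin : min (a + 1) r - min a r = (if a < r then 1 else 0) := by split_ifs <;> omega
    have hite : (0:Int) ≤ (if a < r then 1 else 0) := by split_ifs <;> omega
    have e1 : q * (a + 1) = q * a + q := by ring
    have hstepEq : q * (a + 1) + min (a + 1) r = (q * a + min a r) + (q + if a < r then 1 else 0) := by
      linarith
    have hba : q * a + min a r ≤ (paragraphs.length : Int) := hub a ha (by omega)
    have hb1 : q * (a + 1) + min (a + 1) r ≤ (paragraphs.length : Int) := hub (a+1) (by omega) (by omega)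
    rw [PySem.List.pyRange_one_cons hlt]
    simp only [List.foldl_cons, List.map_cons]
    subst hs
    by_cases hge : q * a + min a r ≥ (paragraphs.length : Int)
    · have hEq : q * (a + 1) + min (a + 1) r = q * a + min a r := by linarith
      rw [if_pos hge]
      rw [ih (a+1) (q * a + min a r) (P ++ [""]) (by omega) (by omega) (by omega)]
      have hgv : PySem.Str.join "\n\n" (PySem.List.slice paragraphs
          (some (q * a + min a r)) (some (q * (a + 1) + min (a + 1) r))) = "" := by
        rw [hEq, pv_slice_self]
        rfl
      rw [hgv]
      simp
    · rw [if_neg hge]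
      have hmin2 : min ((q * a + min a r) + (q + if a < r then 1 else 0)) (paragraphs.length : Int)
          = q * (a + 1) + min (a + 1) r := by
        rw [← hstepEq]
        exact min_eq_left (by linarith)
      rw [hmin2]
      rw [ih (a+1) (q * (a + 1) + min (a + 1) r) _ (by omega) (by omega) rfl]
      simp

-- ===== VERDICT (by name: the statement is the Claim_ definition above) =====
theorem create_pages_py_spec : Claim_equal_create_pages_py := by
  intro paragraphs total_pages _hdom hpre
  unfold Spec_create_pages_py create_pages_py create_pages_py_alt
  by_cases hne : paragraphs = []
  · simp [hne]
  · rw [if_neg hne, if_neg hne]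
    have htp0 : total_pages ≠ 0 := by
      rcases hpre with h | h
      · exact absurd h hne
      · exact h
    by_cases hpos : 0 < total_pages
    · have hn0 : (0:Int) ≤ (paragraphs.length : Int) := by positivity
      have hq0 : 0 ≤ PySem.Int.floordiv (paragraphs.length : Int) total_pages := by
        have := (PySem.Int.le_floordiv_iff_mul_le (q := 0) (a := (paragraphs.length : Int)) (b := total_pages) hpos)
        exact this.mpr (by simp [hn0])
      have hrlt : PySem.Int.mod (paragraphs.length : Int) total_pages < total_pages :=
        PySem.Int.mod_lt _ hpos
      have hr0 : 0 ≤ PySem.Int.mod (paragraphs.length : Int) total_pages :=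
        PySem.Int.mod_nonneg _ hpos
      have hqr := PySem.Int.floordiv_mul_add_mod (paragraphs.length : Int) total_pages
      exact pv_loop paragraphs total_pages _ _ hq0 hrlt hqr
        (total_pages - 0).toNat 0 0 [] rfl le_rfl (by omega)
    · rw [PySem.List.pyRange_one_eq_nil (by omega)]
      simp
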